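-- pv_equiv track=rewrite | github.com/TruongVanChung2411/CTDL | Baitap buoi 4/Bai5/bai5_4.py | find_all_valid_expressions
-- ===== SOURCE A (Python) =====
-- from itertools import combinations
--
-- def remove_parentheses(expression, pairs_to_remove):
--     """Hàm xóa các cặp dấu ngoặc dựa trên danh sách chỉ số cặp dấu ngoặc cần xóa"""
--     to_remove = set()  # Tập các vị trí cần xóa
--     for open_index, close_index in pairs_to_remove:
--         to_remove.add(open_index)
--         to_remove.add(close_index)
--
--     result = []  # Biểu thức sau khi xóa dấu ngoặc
--     for i, char in enumerate(expression):
--         if i not in to_remove: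
--             result.append(char)
--
--     return ''.join(result)
--
-- def find_all_valid_expressions(expression):
--     """Tìm tất cả các biểu thức hợp lệ bằng cách xóa dấu ngoặc"""
--     stack = []
--     pairs = []  # Danh sách các cặp ngoặc (chỉ số của dấu '(' và ')')
--
--     # Xác định vị trí các cặp ngoặc
--     for i, char in enumerate(expression):
--         if char == '(':
--             stack.append(i)
--         elif char == ')':
--             open_index = stack.pop()
--             pairs.append((open_index, i))
--
--     # Tập hợp kết quả lưu các biểu thức hợp lệ
--     results = set()
--
--     # Sinh tất cả các tổ hợp dấu ngoặc cần xóa (bỏ ít nhất 1 cặp)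
--     n = len(pairs)
--     for r in range(1, n + 1):
--         for combination in combinations(pairs, r):
--             new_expression = remove_parentheses(expression, combination)
--             results.add(new_expression)
--
--     # Chuyển kết quả thành danh sách và sắp xếp theo thứ tự từ điển
--     sorted_results = sorted(results)
--     return sorted_results
-- ===== SOURCE B (Python) =====
-- def find_all_valid_expressions(expression):
--     """Same result as A: recursion over the parenthesis pairs (keep vs remove),
--     instead of itertools.combinations grouped by subset size."""
--     stack = []
--     pairs = []
--     for i, char in enumerate(expression):
--         if char == '(':
--             stack.append(i)
--         elif char == ')':
--             pairs.append((stack.pop(), i))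
--
--     results = set()
--
--     def go(rest, removed):
--         if not rest:
--             if removed:
--                 results.add(''.join(ch for i, ch in enumerate(expression) if i not in removed))
--             return
--         o, c = rest[0]
--         go(rest[1:], removed)              # keep this pair
--         go(rest[1:], removed | {o, c})     # remove this pair
--
--     go(pairs, frozenset())
--     return sorted(results)
-- ===== Notes on version B (the rewrite author's own statement) =====
-- stated objective: alternative
-- what changed: Replaced the size-grouped itertools.combinations double loop by a keep-vs-remove recursion over the pair list that accumulates the removed-index set and skips the empty selection at the base case.
import Mathlib
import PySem

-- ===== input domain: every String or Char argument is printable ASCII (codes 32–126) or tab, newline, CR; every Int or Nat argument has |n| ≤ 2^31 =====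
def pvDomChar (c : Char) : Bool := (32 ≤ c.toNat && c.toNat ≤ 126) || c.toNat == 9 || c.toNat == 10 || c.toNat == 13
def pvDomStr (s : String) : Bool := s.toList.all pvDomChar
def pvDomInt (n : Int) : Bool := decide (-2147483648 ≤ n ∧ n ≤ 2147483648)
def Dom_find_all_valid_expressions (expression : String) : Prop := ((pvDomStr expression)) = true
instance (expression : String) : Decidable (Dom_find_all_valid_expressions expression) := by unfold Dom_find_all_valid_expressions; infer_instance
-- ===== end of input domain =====

-- B replaces A's size-grouped itertools.combinations double loop by a keep/remove recursion
-- over the pair list (objective: alternative decomposition, same result).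

-- ===== PORT A =====

-- the parenthesis-pair scan both Pythons contain verbatim ('for i, char in enumerate: …'):
-- 'some (stack, pairs)' is the loop state; 'none' is the IndexError of stack.pop() on ')' with an empty stack
def pvScanStep (st : Option (List Int × List (Int × Int))) (ic : Int × Char) :
    Option (List Int × List (Int × Int)) :=
  match st with
  | none => none
  | some (stack, pairs) =>
    if ic.2 = '(' then some (stack ++ [ic.1], pairs)
    else if ic.2 = ')' then
      match PySem.List.pop? stack with
      | none => none
      | some (open_index, stack') => some (stack', pairs ++ [(open_index, ic.1)])
    else some (stack, pairs)

def pvScan (expression : String) : Option (List Int × List (Int × Int)) :=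
  (PySem.List.enumerate expression.toList 0).foldl pvScanStep (some ([], []))

-- A's helper remove_parentheses, step for step
def remove_parentheses (expression : String) (pairs_to_remove : List (Int × Int)) : String :=
  let to_remove : PySem.Set Int :=
    pairs_to_remove.foldl (fun s oc => PySem.Set.add (PySem.Set.add s oc.1) oc.2) PySem.Set.empty
  let result : List Char :=
    (PySem.List.enumerate expression.toList 0).foldl
      (fun acc ic => if !(PySem.Set.contains to_remove ic.1) then acc ++ [ic.2] else acc) []
  String.ofList result

-- itertools.combinations(xs, r): the length-r sublists in itertools' order
def pvCombos {α : Type} : List α → Nat → List (List α)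
  | _, 0 => [[]]
  | [], _ + 1 => []
  | x :: tl, r + 1 => (pvCombos tl r).map (fun c => x :: c) ++ pvCombos tl (r + 1)

def find_all_valid_expressions (expression : String) : List String :=
  match pvScan expression with
  | none => []   -- stack.pop() raised IndexError: excluded by Pre_
  | some (_, pairs) =>
    let n := pairs.length
    let results : PySem.Set String :=
      (PySem.List.pyRange 1 ((n : Int) + 1) 1).foldl
        (fun res r =>
          (pvCombos pairs r.toNat).foldl
            (fun res combination => PySem.Set.add res (remove_parentheses expression combination)) res)
        PySem.Set.empty
    PySem.List.sorted results (fun x => x) false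

-- ===== PORT B =====

-- B's recursion: for each pair decide keep / remove, carrying the removed-index set;
-- at the base, rebuild the string unless nothing was removed
def pvGo (expression : String) (rest : List (Int × Int)) (removed : PySem.Set Int)
    (results : PySem.Set String) : PySem.Set String :=
  match rest with
  | [] =>
    if removed = [] then results
    else PySem.Set.add results
      (String.ofList (((PySem.List.enumerate expression.toList 0).filter
        (fun ic => !(PySem.Set.contains removed ic.1))).map (fun ic => ic.2)))
  | p :: tl =>
    let r1 := pvGo expression tl removed results                                   -- keep this pair
    pvGo expression tl (PySem.Set.union removed (PySem.Set.ofList [p.1, p.2])) r1  -- remove it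

def find_all_valid_expressions_alt (expression : String) : List String :=
  match pvScan expression with
  | none => []   -- stack.pop() raised IndexError: excluded by Pre_
  | some (_, pairs) =>
    PySem.List.sorted (pvGo expression pairs PySem.Set.empty PySem.Set.empty) (fun x => x) false

-- ===== PRECONDITION & SPEC =====
-- Pre_ excludes exactly the unbalanced inputs where some ')' has no matching '(' before it:
-- there both A and B raise IndexError from stack.pop().
def Pre_find_all_valid_expressions (expression : String) : Prop :=
  ∀ p ∈ expression.toList.inits, p.count ')' ≤ p.count '('
instance (expression : String) : Decidable (Pre_find_all_valid_expressions expression) := by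
  unfold Pre_find_all_valid_expressions; infer_instance

def pvWitness_find_all_valid_expressions : String := "(a+(b))"

def Spec_find_all_valid_expressions (expression : String) (out : List String) : Prop := out = find_all_valid_expressions_alt expression
instance (expression : String) (out : List String) : Decidable (Spec_find_all_valid_expressions expression out) := by unfold Spec_find_all_valid_expressions; infer_instance

-- ===== CLAIM (what is proved, stated in full; the proofs are below) =====
def Claim_equal_find_all_valid_expressions : Prop := ∀ (expression : String), Dom_find_all_valid_expressions expression → Pre_find_all_valid_expressions expression → Spec_find_all_valid_expressions expression (find_all_valid_expressions expression)

-- ===== LEMMAS AND PROOFS =====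

-- the removed-index set accumulated over a chosen sublist of pairs
def pvRemovedOf (removed : PySem.Set Int) (sub : List (Int × Int)) : PySem.Set Int :=
  sub.foldl (fun s oc => PySem.Set.add (PySem.Set.add s oc.1) oc.2) removed

-- the rebuilt string, as both ports produce it
def pvBuild (expression : String) (removed : PySem.Set Int) : String :=
  String.ofList (((PySem.List.enumerate expression.toList 0).filter
    (fun ic => !(PySem.Set.contains removed ic.1))).map (fun ic => ic.2))

theorem pvRemove_eq_build (expression : String) (c : List (Int × Int)) :
    remove_parentheses expression c = pvBuild expression (pvRemovedOf PySem.Set.empty c) := by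
  unfold remove_parentheses pvBuild pvRemovedOf
  simp only [PySem.List.foldl_append_if]
  simp

theorem pvMem_combos {α : Type} (xs : List α) (r : Nat) (c : List α) :
    c ∈ pvCombos xs r ↔ c.Sublist xs ∧ c.length = r := by
  induction xs generalizing r c with
  | nil =>
    cases r with
    | zero => simp [pvCombos, List.length_eq_zero_iff]
    | succ r => simp [pvCombos, List.sublist_nil]; rintro rfl; simp
  | cons x tl ih =>
    cases r with
    | zero =>
      simp only [pvCombos, List.mem_singleton, List.length_eq_zero_iff]
      constructor
      · rintro rfl; exact ⟨List.nil_sublist _, rfl⟩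
      · rintro ⟨_, rfl⟩; rfl
    | succ r =>
      simp only [pvCombos, List.mem_append, List.mem_map]
      rw [List.sublist_cons_iff]
      constructor
      · rintro (⟨d, hd, rfl⟩ | h)
        · exact ⟨Or.inr ⟨d, rfl, ((ih r d).1 hd).1⟩, by simp [((ih r d).1 hd).2]⟩
        · exact ⟨Or.inl ((ih (r+1) c).1 h).1, ((ih (r+1) c).1 h).2⟩
      · rintro ⟨(h | ⟨d, rfl, hd⟩), hl⟩
        · exact Or.inr ((ih (r+1) c).2 ⟨h, hl⟩)
        · exact Or.inl ⟨d, (ih r d).2 ⟨hd, by simpa using hl⟩, rfl⟩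

theorem pvUnion_pair (s : PySem.Set Int) (o c : Int) :
    PySem.Set.union s (PySem.Set.ofList [o, c]) = PySem.Set.add (PySem.Set.add s o) c := by
  by_cases h : c = o
  · subst h
    have hof : PySem.Set.ofList [c, c] = [c] := by simp [PySem.Set.ofList]
    rw [PySem.Set.union, hof]
    have : (s.add c).add c = s.add c := PySem.Set.add_of_mem (by simp [PySem.Set.mem_add])
    rw [this]
    simp [PySem.Set.update]
  · have hof : PySem.Set.ofList [o, c] = [o, c] := by
      simp [PySem.Set.ofList, h]
    rw [PySem.Set.union, hof]
    simp [PySem.Set.update]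

theorem pvMem_resA (expression : String) (pairs : List (Int × Int)) (y : String) :
    y ∈ (PySem.List.pyRange 1 ((pairs.length : Int) + 1) 1).foldl
        (fun res r =>
          (pvCombos pairs r.toNat).foldl
            (fun res combination => PySem.Set.add res (remove_parentheses expression combination)) res)
        PySem.Set.empty
      ↔ ∃ c, c.Sublist pairs ∧ c ≠ [] ∧ y = pvBuild expression (pvRemovedOf PySem.Set.empty c) := by
  have main : ∀ (l : List Int) (s : PySem.Set String),
      y ∈ l.foldl (fun res r =>
          (pvCombos pairs r.toNat).foldl
            (fun res combination => PySem.Set.add res (remove_parentheses expression combination)) res) s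
        ↔ y ∈ s ∨ ∃ r ∈ l, ∃ c ∈ pvCombos pairs r.toNat, y = remove_parentheses expression c := by
    intro l
    induction l with
    | nil => simp
    | cons r tl ih =>
      intro s
      rw [List.foldl_cons, ih]
      rw [PySem.Set.mem_foldl_add]
      constructor
      · rintro ((h | ⟨c, hc, rfl⟩) | ⟨r', hr', c, hc, rfl⟩)
        · exact Or.inl h
        · exact Or.inr ⟨r, by simp, c, hc, rfl⟩
        · exact Or.inr ⟨r', by simp [hr'], c, hc, rfl⟩
      · rintro (h | ⟨r', hr', c, hc, rfl⟩)
        · exact Or.inl (Or.inl h)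
        · rcases List.mem_cons.1 hr' with rfl | hr'
          · exact Or.inl (Or.inr ⟨c, hc, rfl⟩)
          · exact Or.inr ⟨r', hr', c, hc, rfl⟩
  rw [main]
  simp only [PySem.Set.empty, List.not_mem_nil, false_or, PySem.List.mem_pyRange_one]
  constructor
  · rintro ⟨r, ⟨hr1, hr2⟩, c, hc, rfl⟩
    rcases (pvMem_combos _ _ _).1 hc with ⟨hsub, hlen⟩
    refine ⟨c, hsub, ?_, pvRemove_eq_build _ _⟩
    intro hnil
    subst hnil
    simp at hlen
    omega
  · rintro ⟨c, hsub, hne, rfl⟩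
    have hpos : 0 < c.length := List.length_pos_iff.2 hne
    have hle : c.length ≤ pairs.length := hsub.length_le
    refine ⟨(c.length : Int), ⟨by exact_mod_cast hpos, by omega⟩,
      c, (pvMem_combos _ _ _).2 ⟨hsub, by simp⟩, (pvRemove_eq_build _ _).symm⟩

theorem pvMem_go (expression : String) (rest : List (Int × Int)) (removed : PySem.Set Int)
    (results : PySem.Set String) (y : String) :
    y ∈ pvGo expression rest removed results ↔
      y ∈ results ∨ ∃ c, c.Sublist rest ∧ (removed ≠ [] ∨ c ≠ []) ∧
        y = pvBuild expression (pvRemovedOf removed c) := by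
  induction rest generalizing removed results with
  | nil =>
    simp only [pvGo]
    by_cases h : removed = []
    · simp only [if_pos h]
      constructor
      · intro hy; exact Or.inl hy
      · rintro (hy | ⟨c, hc, hor, rfl⟩)
        · exact hy
        · rcases hor with hr | hcne
          · exact absurd h hr
          · exact absurd (List.sublist_nil.1 hc) hcne
    · rw [if_neg h, PySem.Set.mem_add]
      constructor
      · rintro (hy | rfl)
        · exact Or.inl hy
        · exact Or.inr ⟨[], List.nil_sublist _, Or.inl h, rfl⟩
      · rintro (hy | ⟨c, hc, _, rfl⟩)
        · exact Or.inl hy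
        · rw [List.sublist_nil.1 hc]
          exact Or.inr rfl
  | cons p tl ih =>
    simp only [pvGo, pvUnion_pair]
    rw [ih, ih]
    constructor
    · rintro ((hy | ⟨c, hc, hor, rfl⟩) | ⟨c, hc, hor, rfl⟩)
      · exact Or.inl hy
      · exact Or.inr ⟨c, hc.trans (List.sublist_cons_self _ _), hor, rfl⟩
      · refine Or.inr ⟨p :: c, List.cons_sublist_cons.2 hc, Or.inr (by simp), ?_⟩
        rfl
    · rintro (hy | ⟨c, hc, hor, rfl⟩)
      · exact Or.inl (Or.inl hy)
      · rcases List.sublist_cons_iff.1 hc with hctl | ⟨d, rfl, hd⟩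
        · exact Or.inl (Or.inr ⟨c, hctl, hor, rfl⟩)
        · refine Or.inr ⟨d, hd, ?_, rfl⟩
          left
          intro hnil
          have : p.1 ∈ PySem.Set.add (PySem.Set.add removed p.1) p.2 := by simp [PySem.Set.mem_add]
          simp [hnil] at this

theorem pvNodup_foldl_add {β : Type} (f : β → String) (l : List β) (s : PySem.Set String)
    (h : s.Nodup) : (l.foldl (fun s b => PySem.Set.add s (f b)) s).Nodup := by
  rw [← PySem.Set.update_map_eq_foldl_add]
  exact PySem.Set.nodup_update _ _ h

theorem pvNodup_resA (expression : String) (pairs : List (Int × Int)) :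
    ((PySem.List.pyRange 1 ((pairs.length : Int) + 1) 1).foldl
        (fun res r =>
          (pvCombos pairs r.toNat).foldl
            (fun res combination => PySem.Set.add res (remove_parentheses expression combination)) res)
        PySem.Set.empty).Nodup := by
  have main : ∀ (l : List Int) (s : PySem.Set String), s.Nodup →
      (l.foldl (fun res r =>
          (pvCombos pairs r.toNat).foldl
            (fun res combination => PySem.Set.add res (remove_parentheses expression combination)) res) s).Nodup := by
    intro l
    induction l with
    | nil => intro s h; simpa using h
    | cons r tl ih =>
      intro s h
      rw [List.foldl_cons]
      exact ih _ (pvNodup_foldl_add _ _ _ h)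
  exact main _ _ List.nodup_nil

theorem pvNodup_go (expression : String) (rest : List (Int × Int)) (removed : PySem.Set Int)
    (results : PySem.Set String) (h : results.Nodup) :
    (pvGo expression rest removed results).Nodup := by
  induction rest generalizing removed results with
  | nil =>
    simp only [pvGo]
    split_ifs
    · exact h
    · exact PySem.Set.nodup_add _ _ h
  | cons p tl ih =>
    exact ih _ _ (ih _ _ h)

theorem pvScanFold_isSome (cs : List Char) : ∀ (s : Int) (stack : List Int) (pairs : List (Int × Int)),
    (∀ p, p <+: cs → p.count ')' ≤ stack.length + p.count '(') →
    ((PySem.List.enumerate cs s).foldl pvScanStep (some (stack, pairs))).isSome := by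
  induction cs with
  | nil => intro s stack pairs _; simp [PySem.List.enumerate_nil]
  | cons c tl ih =>
    intro s stack pairs h
    rw [PySem.List.enumerate_cons, List.foldl_cons]
    by_cases hc1 : c = '('
    · subst hc1
      have step : pvScanStep (some (stack, pairs)) (s, '(') = some (stack ++ [s], pairs) := by
        simp [pvScanStep]
      rw [step]
      apply ih
      intro p hp
      have := h ('(' :: p) (List.cons_prefix_cons.2 ⟨rfl, hp⟩)
      simp at this ⊢
      omega
    · by_cases hc2 : c = ')'
      · subst hc2
        have hne : stack ≠ [] := by
          intro hnil
          have := h [')'] (by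
            cases tl with
            | nil => exact List.prefix_refl _ |>.trans (by simp)
            | cons a b => exact ⟨a :: b, rfl⟩)
          simp [hnil] at this
        obtain ⟨st', x, hstk⟩ := (List.eq_nil_or_concat stack).resolve_left hne
        rw [List.concat_eq_append] at hstk
        subst hstk
        have step : pvScanStep (some (st' ++ [x], pairs)) (s, ')') =
            some (st', pairs ++ [(x, s)]) := by
          simp [pvScanStep, PySem.List.pop?_last]
        rw [step]
        apply ih
        intro p hp
        have := h (')' :: p) (List.cons_prefix_cons.2 ⟨rfl, hp⟩)
        simp at this ⊢
        omega
      · have step : pvScanStep (some (stack, pairs)) (s, c) = some (stack, pairs) := by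
          simp [pvScanStep, hc1, hc2]
        rw [step]
        apply ih
        intro p hp
        have := h (c :: p) (List.cons_prefix_cons.2 ⟨rfl, hp⟩)
        simp [hc1, hc2] at this ⊢
        omega

theorem pvScan_isSome (expression : String)
    (h : Pre_find_all_valid_expressions expression) : (pvScan expression).isSome := by
  apply pvScanFold_isSome
  intro p hp
  simpa using h p (List.mem_inits _ _ |>.2 hp)

-- ===== VERDICT (by name: the statement is the Claim_ definition above) =====
theorem find_all_valid_expressions_spec : Claim_equal_find_all_valid_expressions := by
  intro expression _ hpre
  unfold Spec_find_all_valid_expressions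
  obtain ⟨⟨st, pairs⟩, hsome⟩ := Option.isSome_iff_exists.1 (pvScan_isSome expression hpre)
  unfold find_all_valid_expressions find_all_valid_expressions_alt
  rw [hsome]
  apply (PySem.List.sorted_id_eq_sorted_id_iff_perm _ _).2
  apply (List.perm_ext_iff_of_nodup (pvNodup_resA expression pairs)
    (pvNodup_go expression pairs _ _ List.nodup_nil)).2
  intro y
  rw [pvMem_resA, pvMem_go]
  constructor
  · rintro ⟨c, hsub, hne, rfl⟩
    exact Or.inr ⟨c, hsub, Or.inr hne, rfl⟩
  · rintro (hy | ⟨c, hsub, hor, rfl⟩)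
    · exact absurd hy (List.not_mem_nil)
    · refine ⟨c, hsub, ?_, rfl⟩
      rcases hor with he | hne
      · exact absurd rfl he
      · exact hne
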